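-- pv_equiv track=rewrite | github.com/casper01/AdventOfCode2018 | 20/main.py | findEnclosingParenthesisAndSplits
-- ===== SOURCE A (Python) =====
-- def findEnclosingParenthesisAndSplits(data, start):
--     i = start
--     lvl = 0
--     splits = []
--     splits.append(start)
--     while True:
--         if data[i] == '(':
--             lvl += 1
--         elif data[i] == ')':
--             lvl -= 1
--         elif data[i] == '|' and lvl == 1:
--             splits.append(i)
--         if lvl == 0:
--             splits.append(i)
--             return i, splits
--         i += 1
-- ===== SOURCE B (Python) =====
-- def _findClose(data, start):
--     # first pass: find the index where the nesting level first returns to 0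
--     i = start
--     lvl = 0
--     while True:
--         if data[i] == '(':
--             lvl += 1
--         elif data[i] == ')':
--             lvl -= 1
--         if lvl == 0:
--             return i
--         i += 1
--
--
-- def findEnclosingParenthesisAndSplits(data, start):
--     close = _findClose(data, start)
--     lvl = 0
--     pipes = []
--     for j in range(start, close):
--         c = data[j]
--         if c == '(':
--             lvl += 1
--         elif c == ')':
--             lvl -= 1
--         elif c == '|' and lvl == 1:
--             pipes.append(j)
--     return close, [start] + pipes + [close]
-- ===== Notes on version B (the rewrite author's own statement) =====
-- stated objective: simpler
-- what changed: Splits A's single fused scan (which threads the splits list through the level-tracking loop) into two separate passes: a boundary pass that only finds the matching close position, then a collection pass over the now-known range that gathers level-1 pipe positions; the result list is assembled at the end as [start] + pipes + [close].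
import Mathlib
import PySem

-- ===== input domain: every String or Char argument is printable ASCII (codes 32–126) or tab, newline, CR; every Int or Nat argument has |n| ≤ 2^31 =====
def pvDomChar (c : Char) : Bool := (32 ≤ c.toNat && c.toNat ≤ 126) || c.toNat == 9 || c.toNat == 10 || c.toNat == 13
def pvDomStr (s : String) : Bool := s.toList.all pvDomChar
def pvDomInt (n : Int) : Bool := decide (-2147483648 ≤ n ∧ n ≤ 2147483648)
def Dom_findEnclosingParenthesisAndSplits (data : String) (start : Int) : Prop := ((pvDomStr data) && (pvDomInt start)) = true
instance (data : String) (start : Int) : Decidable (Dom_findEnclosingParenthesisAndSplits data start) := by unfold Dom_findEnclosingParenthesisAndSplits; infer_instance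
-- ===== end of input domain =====

-- B replaces A's single fused scan (which threads the splits list through the level loop) by two
-- separate passes — find the matching close position first, then collect the level-1 '|' positions —
-- same return value (objective: simpler decomposition, same O(n) cost).
-- Both while-loops are ported with a Nat fuel that only makes them total; inside Pre_ the fuel never
-- runs out, and the `none` arm of pyGet? is Python's IndexError (excluded by Pre_).

-- the if/elif level update both Pythons perform on each character
def pvLvlStep (c : Char) (lvl : Int) : Int :=
  if c = '(' then lvl + 1 else if c = ')' then lvl - 1 else lvl

-- ===== PORT A =====
-- A's while-True loop: state (i, lvl, splits)
def pvLoopA (cs : List Char) : Nat → Int → Int → List Int → Int × List Int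
  | 0, _, _, _ => (0, [])
  | n + 1, i, lvl, splits =>
    match PySem.List.pyGet? cs i with
    | none => (0, [])
    | some c =>
      if pvLvlStep c lvl = 0 then
        (i, (if c = '|' ∧ lvl = 1 then splits ++ [i] else splits) ++ [i])
      else
        pvLoopA cs n (i + 1) (pvLvlStep c lvl) (if c = '|' ∧ lvl = 1 then splits ++ [i] else splits)

def findEnclosingParenthesisAndSplits (data : String) (start : Int) : Int × List Int :=
  pvLoopA data.toList (((data.toList.length : Int) - start).toNat + 1) start 0 [start]

-- ===== PORT B =====
-- first pass (_findClose in Source B): where the level first returns to 0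
def pvFindClose (cs : List Char) : Nat → Int → Int → Int
  | 0, _, _ => 0
  | n + 1, i, lvl =>
    match PySem.List.pyGet? cs i with
    | none => 0
    | some c =>
      if pvLvlStep c lvl = 0 then i else pvFindClose cs n (i + 1) (pvLvlStep c lvl)

-- body of Source B's `for j in range(start, close)` with its (lvl, pipes) state
def pvScanStep (cs : List Char) (acc : Int × List Int) (j : Int) : Int × List Int :=
  match PySem.List.pyGet? cs j with
  | none => acc
  | some c => (pvLvlStep c acc.1, if c = '|' ∧ acc.1 = 1 then acc.2 ++ [j] else acc.2)

def findEnclosingParenthesisAndSplits_alt (data : String) (start : Int) : Int × List Int :=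
  let cs := data.toList
  let close := pvFindClose cs (((cs.length : Int) - start).toNat + 1) start 0
  (close, [start] ++ ((PySem.List.pyRange start close 1).foldl (pvScanStep cs) (0, [])).2 ++ [close])

-- ===== PRECONDITION & SPEC =====
-- helpers for the precondition: the character's level delta and the running level sum
def pvDelta (c : Char) : Int := if c = '(' then 1 else if c = ')' then -1 else 0

def pvDeltaAt (cs : List Char) (j : Int) : Int :=
  match PySem.List.pyGet? cs j with
  | none => 0
  | some c => pvDelta c

def pvSum (cs : List Char) (i : Int) : Nat → Int
  | 0 => pvDeltaAt cs i
  | k + 1 => pvSum cs i k + pvDeltaAt cs (i + (k : Int) + 1)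

-- Exactly the inputs on which A returns: start is a valid (possibly negative) index and the running
-- level reaches 0 at some position before the end of the string; everywhere else A raises IndexError.
def Pre_findEnclosingParenthesisAndSplits (data : String) (start : Int) : Prop :=
  -(data.toList.length : Int) ≤ start ∧
  ∃ k ∈ List.range (((data.toList.length : Int) - start).toNat), pvSum data.toList start k = 0

instance (data : String) (start : Int) : Decidable (Pre_findEnclosingParenthesisAndSplits data start) := by
  unfold Pre_findEnclosingParenthesisAndSplits; infer_instance

def pvWitness_findEnclosingParenthesisAndSplits : String × Int := ("(a|b)", 0)

def Spec_findEnclosingParenthesisAndSplits (data : String) (start : Int) (out : Int × List Int) : Prop := out = findEnclosingParenthesisAndSplits_alt data start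
instance (data : String) (start : Int) (out : Int × List Int) : Decidable (Spec_findEnclosingParenthesisAndSplits data start out) := by unfold Spec_findEnclosingParenthesisAndSplits; infer_instance

-- ===== CLAIM (what is proved, stated in full; the proofs are below) =====
def Claim_equal_findEnclosingParenthesisAndSplits : Prop := ∀ (data : String) (start : Int), Dom_findEnclosingParenthesisAndSplits data start → Pre_findEnclosingParenthesisAndSplits data start → Spec_findEnclosingParenthesisAndSplits data start (findEnclosingParenthesisAndSplits data start)

-- ===== LEMMAS AND PROOFS =====

theorem pvGetSome (cs : List Char) {i : Int} (h1 : -(cs.length : Int) ≤ i)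
    (h2 : i < (cs.length : Int)) : ∃ c, PySem.List.pyGet? cs i = some c := by
  cases hg : PySem.List.pyGet? cs i with
  | some c => exact ⟨c, rfl⟩
  | none =>
    rw [PySem.List.pyGet?_eq_none_iff] at hg
    exact absurd (show PySem.Raise.InRange cs.length i by
      unfold PySem.Raise.InRange; exact ⟨h1, h2⟩) hg

theorem pvLvlStep_eq_add (c : Char) (lvl : Int) : pvLvlStep c lvl = lvl + pvDelta c := by
  unfold pvLvlStep pvDelta
  split_ifs <;> ring

theorem pvNoPipeAtClose (c : Char) (lvl : Int) (hz : pvLvlStep c lvl = 0) :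
    ¬(c = '|' ∧ lvl = 1) := by
  rintro ⟨rfl, rfl⟩
  exact absurd hz (by decide)

-- the pipe positions A records from state (i, lvl), as a standalone list (proof device)
def pvPipes (cs : List Char) : Nat → Int → Int → List Int
  | 0, _, _ => []
  | n + 1, i, lvl =>
    match PySem.List.pyGet? cs i with
    | none => []
    | some c =>
      if pvLvlStep c lvl = 0 then []
      else (if c = '|' ∧ lvl = 1 then [i] else []) ++ pvPipes cs n (i + 1) (pvLvlStep c lvl)

theorem pvSum_succ (cs : List Char) (i : Int) (k : Nat) :
    pvSum cs i (k + 1) = pvDeltaAt cs i + pvSum cs (i + 1) k := by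
  induction k with
  | zero => simp [pvSum]
  | succ k ih =>
    have e1 : i + ((k : Int) + 1) + 1 = (i + 1) + (k : Int) + 1 := by ring
    calc pvSum cs i (k + 1 + 1)
        = pvSum cs i (k + 1) + pvDeltaAt cs (i + ((k + 1 : Nat) : Int) + 1) := rfl
      _ = (pvDeltaAt cs i + pvSum cs (i + 1) k) + pvDeltaAt cs ((i + 1) + (k : Int) + 1) := by
          rw [ih]; push_cast; rw [e1]
      _ = pvDeltaAt cs i + pvSum cs (i + 1) (k + 1) := by
          simp only [pvSum]; ring

-- the termination witness shifts by one step of the loop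
theorem pvTermShift {cs : List Char} {i lvl : Int} {c : Char}
    (hc : PySem.List.pyGet? cs i = some c) (hz : pvLvlStep c lvl ≠ 0) (k : Nat)
    (hk1 : i + (k : Int) < (cs.length : Int)) (hk2 : lvl + pvSum cs i k = 0) :
    ∃ k' : Nat, (i + 1) + (k' : Int) < (cs.length : Int) ∧ pvLvlStep c lvl + pvSum cs (i + 1) k' = 0 := by
  have hD : pvDeltaAt cs i = pvDelta c := by simp [pvDeltaAt, hc]
  cases k with
  | zero =>
    exfalso
    have h0 : pvSum cs i 0 = pvDelta c := by rw [show pvSum cs i 0 = pvDeltaAt cs i from rfl, hD]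
    rw [h0] at hk2
    exact hz (by rw [pvLvlStep_eq_add]; omega)
  | succ k' =>
    refine ⟨k', by push_cast at hk1 ⊢; omega, ?_⟩
    rw [pvSum_succ, hD] at hk2
    rw [pvLvlStep_eq_add]
    omega

theorem pvFindClose_bounds (cs : List Char) : ∀ (n : Nat) (i lvl : Int),
    (((cs.length : Int) - i).toNat < n) → -(cs.length : Int) ≤ i →
    (∃ k : Nat, i + (k : Int) < (cs.length : Int) ∧ lvl + pvSum cs i k = 0) →
    i ≤ pvFindClose cs n i lvl ∧ pvFindClose cs n i lvl < (cs.length : Int) := by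
  intro n
  induction n with
  | zero => intro i lvl hn _ _; exact absurd hn (Nat.not_lt_zero _)
  | succ n ih =>
    intro i lvl hn h1 hex
    obtain ⟨k, hk1, hk2⟩ := hex
    have hilt : i < (cs.length : Int) := by omega
    obtain ⟨c, hc⟩ := pvGetSome cs h1 hilt
    simp only [pvFindClose, hc]
    by_cases hz : pvLvlStep c lvl = 0
    · rw [if_pos hz]; exact ⟨le_refl i, hilt⟩
    · rw [if_neg hz]
      obtain ⟨k', hk1', hk2'⟩ := pvTermShift hc hz k hk1 hk2
      have hrec := ih (i + 1) (pvLvlStep c lvl) (by omega) (by omega) ⟨k', hk1', hk2'⟩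
      exact ⟨by omega, hrec.2⟩

theorem pvLoopA_main (cs : List Char) : ∀ (n : Nat) (i lvl : Int) (splits : List Int),
    (((cs.length : Int) - i).toNat < n) → -(cs.length : Int) ≤ i →
    (∃ k : Nat, i + (k : Int) < (cs.length : Int) ∧ lvl + pvSum cs i k = 0) →
    pvLoopA cs n i lvl splits =
      (pvFindClose cs n i lvl, splits ++ pvPipes cs n i lvl ++ [pvFindClose cs n i lvl]) := by
  intro n
  induction n with
  | zero => intro i lvl splits hn _ _; exact absurd hn (Nat.not_lt_zero _)
  | succ n ih =>
    intro i lvl splits hn h1 hex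
    obtain ⟨k, hk1, hk2⟩ := hex
    have hilt : i < (cs.length : Int) := by omega
    obtain ⟨c, hc⟩ := pvGetSome cs h1 hilt
    simp only [pvLoopA, pvFindClose, pvPipes, hc]
    by_cases hz : pvLvlStep c lvl = 0
    · rw [if_pos hz, if_pos hz, if_pos hz, if_neg (pvNoPipeAtClose c lvl hz)]
      simp
    · rw [if_neg hz, if_neg hz, if_neg hz]
      obtain ⟨k', hk1', hk2'⟩ := pvTermShift hc hz k hk1 hk2
      rw [ih (i + 1) (pvLvlStep c lvl) _ (by omega) (by omega) ⟨k', hk1', hk2'⟩]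
      by_cases hp : c = '|' ∧ lvl = 1
      · rw [if_pos hp, if_pos hp]; simp
      · rw [if_neg hp, if_neg hp]; simp

theorem pvScan_main (cs : List Char) : ∀ (n : Nat) (i lvl : Int) (pipes : List Int) (close : Int),
    (((cs.length : Int) - i).toNat < n) → -(cs.length : Int) ≤ i →
    (∃ k : Nat, i + (k : Int) < (cs.length : Int) ∧ lvl + pvSum cs i k = 0) →
    close = pvFindClose cs n i lvl →
    ((PySem.List.pyRange i close 1).foldl (pvScanStep cs) (lvl, pipes)).2 =
      pipes ++ pvPipes cs n i lvl := by
  intro n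
  induction n with
  | zero => intro i lvl pipes close hn _ _ _; exact absurd hn (Nat.not_lt_zero _)
  | succ n ih =>
    intro i lvl pipes close hn h1 hex hclose
    obtain ⟨k, hk1, hk2⟩ := hex
    have hilt : i < (cs.length : Int) := by omega
    obtain ⟨c, hc⟩ := pvGetSome cs h1 hilt
    simp only [pvFindClose, hc] at hclose
    simp only [pvPipes, hc]
    by_cases hz : pvLvlStep c lvl = 0
    · rw [if_pos hz] at hclose
      rw [if_pos hz]
      rw [hclose, PySem.List.pyRange_one_eq_nil (le_refl i)]
      simp
    · rw [if_neg hz] at hclose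
      rw [if_neg hz]
      obtain ⟨k', hk1', hk2'⟩ := pvTermShift hc hz k hk1 hk2
      have hge := pvFindClose_bounds cs n (i + 1) (pvLvlStep c lvl) (by omega) (by omega)
        ⟨k', hk1', hk2'⟩
      have hic : i < close := by rw [hclose]; omega
      rw [PySem.List.pyRange_one_cons hic]
      rw [List.foldl_cons]
      have hstep : pvScanStep cs (lvl, pipes) i =
          (pvLvlStep c lvl, if c = '|' ∧ lvl = 1 then pipes ++ [i] else pipes) := by
        simp [pvScanStep, hc]
      rw [hstep]
      rw [ih (i + 1) (pvLvlStep c lvl) _ close (by omega) (by omega) ⟨k', hk1', hk2'⟩ hclose]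
      by_cases hp : c = '|' ∧ lvl = 1
      · rw [if_pos hp, if_pos hp]; simp
      · rw [if_neg hp, if_neg hp]; simp

-- ===== VERDICT (by name: the statement is the Claim_ definition above) =====
theorem findEnclosingParenthesisAndSplits_spec : Claim_equal_findEnclosingParenthesisAndSplits := by
  intro data start hdom hpre
  unfold Spec_findEnclosingParenthesisAndSplits
  unfold Pre_findEnclosingParenthesisAndSplits at hpre
  obtain ⟨h1, k, hk, hs⟩ := hpre
  rw [List.mem_range] at hk
  have hk1 : start + (k : Int) < (data.toList.length : Int) := by omega
  have hex : ∃ k : Nat, start + (k : Int) < (data.toList.length : Int) ∧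
      (0 : Int) + pvSum data.toList start k = 0 := ⟨k, hk1, by omega⟩
  have hn : ((data.toList.length : Int) - start).toNat
      < ((data.toList.length : Int) - start).toNat + 1 := Nat.lt_succ_self _
  simp only [findEnclosingParenthesisAndSplits, findEnclosingParenthesisAndSplits_alt]
  rw [pvLoopA_main data.toList (((data.toList.length : Int) - start).toNat + 1) start 0 [start]
    hn h1 hex]
  rw [pvScan_main data.toList (((data.toList.length : Int) - start).toNat + 1) start 0 []
    (pvFindClose data.toList (((data.toList.length : Int) - start).toNat + 1) start 0)
    hn h1 hex rfl]
  simp
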